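-- pv_equiv track=rewrite | github.com/KenSolem/forzarcontrasenia | Actividad_3_Gonzalo_Lemus.py | adivinar_contrasenia
-- ===== SOURCE A (Python) =====
-- from string import ascii_lowercase
--
-- def adivinar_contrasenia(contrasenia):
--   intentos = 0
--   candidato = ""
--   for i in range(len(contrasenia)):
--     for letra in ascii_lowercase:
--       intentos += 1
--       candidato += letra
--       if candidato == contrasenia:
--         return intentos
--     candidato = ""
--   return -1
-- ===== SOURCE B (Python) =====
-- def adivinar_contrasenia(contrasenia):
--   n = len(contrasenia)
--   if n == 0 or n > 26:
--     return -1
--   for i, c in enumerate(contrasenia):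
--     if c != chr(ord('a') + i):
--       return -1
--   return n
-- ===== Notes on version B (the rewrite author's own statement) =====
-- stated objective: faster
-- what changed: Replaced the incremental candidate-string building with nested loops (26 inner steps and a string comparison per character) by a single pass that checks each character against the lowercase letter expected at that index under a length guard, returning the length on success.
import Mathlib
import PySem

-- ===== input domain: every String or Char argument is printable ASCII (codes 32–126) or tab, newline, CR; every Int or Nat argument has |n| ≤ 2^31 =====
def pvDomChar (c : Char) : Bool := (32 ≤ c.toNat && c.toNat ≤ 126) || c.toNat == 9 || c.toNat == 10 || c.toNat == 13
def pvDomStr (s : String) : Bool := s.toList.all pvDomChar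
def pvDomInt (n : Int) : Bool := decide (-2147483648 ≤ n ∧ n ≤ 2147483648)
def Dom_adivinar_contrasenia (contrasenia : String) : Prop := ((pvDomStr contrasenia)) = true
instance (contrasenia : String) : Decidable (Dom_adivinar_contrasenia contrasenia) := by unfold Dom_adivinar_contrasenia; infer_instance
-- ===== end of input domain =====

-- B replaces A's nested candidate-building loops with one indexed pass comparing each
-- character with chr(ord('a')+i) under a length guard (objective: faster by a constant factor).

-- ===== PORT A =====
-- string.ascii_lowercase
def pvAbc : List Char := ['a', 'b', 'c', 'd', 'e', 'f', 'g', 'h', 'i', 'j', 'k', 'l', 'm', 'n', 'o', 'p', 'q', 'r', 's', 't', 'u', 'v', 'w', 'x', 'y', 'z']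

-- inner 'for letra in ascii_lowercase' loop: returns .inl intentos on an early return,
-- .inr intentos (the updated counter) when the loop finishes without matching
def pvInnerA (t : List Char) : Int → List Char → List Char → Sum Int Int
  | intentos, _candidato, [] => .inr intentos
  | intentos, candidato, letra :: rest =>
    let intentos := intentos + 1
    let candidato := candidato ++ [letra]
    if candidato = t then .inl intentos else pvInnerA t intentos candidato rest

-- outer 'for i in range(len(contrasenia))' loop (candidato reset to "" each iteration)
def pvOuterA (t : List Char) : Int → Nat → Int
  | _, 0 => -1
  | intentos, k + 1 =>
    match pvInnerA t intentos [] pvAbc with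
    | .inl r => r
    | .inr intentos' => pvOuterA t intentos' k

def adivinar_contrasenia (contrasenia : String) : Int :=
  pvOuterA contrasenia.toList 0 contrasenia.toList.length

-- ===== PORT B =====
-- the 'for i, c in enumerate(contrasenia)' loop of Source B: false on the first mismatch
def pvScanB : Nat → List Char → Bool
  | _, [] => true
  | i, c :: rest => if c ≠ Char.ofNat (97 + i) then false else pvScanB (i + 1) rest

def adivinar_contrasenia_alt (contrasenia : String) : Int :=
  let n := contrasenia.toList.length
  if n = 0 ∨ n > 26 then -1
  else if pvScanB 0 contrasenia.toList then (n : Int) else -1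

-- ===== PRECONDITION & SPEC =====
def Spec_adivinar_contrasenia (contrasenia : String) (out : Int) : Prop := out = adivinar_contrasenia_alt contrasenia
instance (contrasenia : String) (out : Int) : Decidable (Spec_adivinar_contrasenia contrasenia out) := by unfold Spec_adivinar_contrasenia; infer_instance

-- ===== CLAIM (what is proved, stated in full; the proofs are below) =====
def Claim_equal_adivinar_contrasenia : Prop := ∀ (contrasenia : String), Dom_adivinar_contrasenia contrasenia → Spec_adivinar_contrasenia contrasenia (adivinar_contrasenia contrasenia)

-- ===== LEMMAS AND PROOFS =====

-- Invariant of A's inner loop: after k of the 26 letters, the candidate is the length-k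
-- alphabet prefix; running the remaining 26-k letters matches iff t is an alphabet prefix
-- of length in (k, 26], returning counter n + (|t| - k), else .inr (n + (26 - k)).
theorem pvInnerA_inv (t : List Char) : ∀ (j k : Nat), k + j = 26 → ∀ n : Int,
    pvInnerA t n (pvAbc.take k) (pvAbc.drop k) =
      if k < t.length ∧ t.length ≤ 26 ∧ t = pvAbc.take t.length
      then .inl (n + ((t.length - k : Nat) : Int)) else .inr (n + (j : Int)) := by
  intro j
  induction j with
  | zero =>
    intro k hk n
    have hk' : k = 26 := by omega
    subst hk'
    rw [show pvAbc.drop 26 = [] from rfl, pvInnerA]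
    rw [if_neg (by rintro ⟨h1, h2, -⟩; omega)]
    simp
  | succ j ih =>
    intro k hk n
    have hlt : k < pvAbc.length := by simp [pvAbc]; omega
    rw [List.drop_eq_getElem_cons hlt, pvInnerA]
    have htake : pvAbc.take k ++ [pvAbc[k]] = pvAbc.take (k + 1) := by
      simpa using List.take_concat_get hlt
    simp only [htake]
    by_cases hm : pvAbc.take (k + 1) = t
    · rw [if_pos hm]
      have hlen : t.length = k + 1 := by
        rw [← hm, List.length_take]; simp [pvAbc]; omega
      rw [if_pos ⟨by omega, by omega, by rw [hlen, hm]⟩]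
      rw [hlen]
      norm_num
    · rw [if_neg hm, ih (k + 1) (by omega) (n + 1)]
      have hiff : (k + 1 < t.length ∧ t.length ≤ 26 ∧ t = pvAbc.take t.length) ↔
          (k < t.length ∧ t.length ≤ 26 ∧ t = pvAbc.take t.length) := by
        constructor
        · rintro ⟨h1, h2, h3⟩; exact ⟨by omega, h2, h3⟩
        · rintro ⟨h1, h2, h3⟩
          refine ⟨?_, h2, h3⟩
          rcases Nat.lt_or_ge (k + 1) t.length with h | h
          · exact h
          · exfalso; exact hm (by rw [h3]; congr 1; omega)
      by_cases hc : k < t.length ∧ t.length ≤ 26 ∧ t = pvAbc.take t.length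
      · rw [if_pos (hiff.mpr hc), if_pos hc]
        have h1 := (hiff.mpr hc).1
        congr 1
        omega
      · rw [if_neg (fun h => hc (hiff.mp h)), if_neg hc]
        congr 1
        omega

-- One full pass of A's inner loop from the empty candidate.
theorem pvInnerA_full (t : List Char) (n : Int) :
    pvInnerA t n [] pvAbc =
      if 1 ≤ t.length ∧ t.length ≤ 26 ∧ t = pvAbc.take t.length
      then .inl (n + (t.length : Int)) else .inr (n + 26) := by
  have h := pvInnerA_inv t 26 0 (by omega) n
  simp only [List.take_zero, List.drop_zero, Nat.sub_zero] at h
  rw [h]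
  simp only [Nat.lt_iff_add_one_le, Nat.zero_add, Nat.cast_ofNat]

theorem pvOuterA_nomatch (t : List Char)
    (h : ¬ (1 ≤ t.length ∧ t.length ≤ 26 ∧ t = pvAbc.take t.length)) :
    ∀ (k : Nat) (n : Int), pvOuterA t n k = -1 := by
  intro k
  induction k with
  | zero => intro n; rfl
  | succ k ih =>
    intro n
    simp only [pvOuterA, pvInnerA_full, if_neg h]
    exact ih _

-- Each alphabet letter is chr(97 + index).
theorem pvAbc_getElem : ∀ k, (hk : k < 26) → pvAbc[k]'(by simp [pvAbc]; omega) = Char.ofNat (97 + k) := by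
  decide

-- B's scan from index k succeeds iff t equals the corresponding alphabet segment.
theorem pvScanB_iff (t : List Char) : ∀ k, k + t.length ≤ 26 →
    (pvScanB k t = true ↔ t = (pvAbc.drop k).take t.length) := by
  induction t with
  | nil => intro k _; simp [pvScanB]
  | cons c rest ih =>
    intro k hk
    have hklt : k < 26 := by simp at hk; omega
    have hlt : k < pvAbc.length := by simp [pvAbc]; omega
    rw [List.drop_eq_getElem_cons hlt, pvAbc_getElem k hklt]
    simp only [pvScanB, List.length_cons, List.take_succ_cons]
    by_cases hc : c = Char.ofNat (97 + k)
    · simp only [hc, ne_eq, not_true_eq_false, if_false]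
      rw [ih (k + 1) (by simp at hk ⊢; omega)]
      simp
    · simp [hc]

theorem adivinar_contrasenia_spec : Claim_equal_adivinar_contrasenia := by
  intro s _
  unfold Spec_adivinar_contrasenia adivinar_contrasenia adivinar_contrasenia_alt
  set t := s.toList with ht
  by_cases hlen : t.length = 0 ∨ t.length > 26
  · rw [if_pos hlen]
    exact pvOuterA_nomatch t (by rintro ⟨h1, h2, -⟩; omega) _ _
  · rw [if_neg hlen]
    rw [not_or] at hlen
    have hscan := pvScanB_iff t 0 (by omega)
    simp only [List.drop_zero] at hscan
    by_cases h : 1 ≤ t.length ∧ t.length ≤ 26 ∧ t = pvAbc.take t.length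
    · rw [if_pos (hscan.mpr h.2.2)]
      obtain ⟨h1, h2, h3⟩ := h
      obtain ⟨k, hk⟩ : ∃ k, t.length = k + 1 := ⟨t.length - 1, by omega⟩
      rw [hk]
      simp only [pvOuterA, pvInnerA_full, zero_add]
      rw [if_pos ⟨by omega, by omega, hk ▸ h3⟩]
      simp [hk]
    · have hnp : ¬ t = pvAbc.take t.length := fun hc => h ⟨by omega, by omega, hc⟩
      rw [if_neg (fun hc => hnp (hscan.mp hc))]
      exact pvOuterA_nomatch t h _ _
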